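-- pv_equiv track=rewrite | github.com/panat54083/010123131 | 2020-08-07/Boolean expression string.py | list_equation
-- ===== SOURCE A (Python) =====
-- def list_equation(equa):
--     SYMBOLS = set('+&!()')
--
--     mark = 0
--     result = []
--     for i in range(len(equa)):
--         if equa[i] in SYMBOLS:
--             if mark != i:
--                 result.append(equa[mark:i])
--             if equa[i] != ' ':
--                 result.append(equa[i])
--             mark = i+1
--     if mark != len(equa):
--         result.append(equa[mark:len(equa)])
--
--     return result
-- ===== SOURCE B (Python) =====
-- def list_equation(equa):
--     # Single pass over characters with a pending-operand buffer (no index/mark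
--     # arithmetic, no slicing); tokens are flushed when a symbol is seen.
--     result = []
--     buf = []
--     for ch in equa:
--         if ch in '+&!()':
--             if buf:
--                 result.append(''.join(buf))
--                 buf = []
--             result.append(ch)
--         else:
--             buf.append(ch)
--     if buf:
--         result.append(''.join(buf))
--     return result
-- ===== Notes on version B (the rewrite author's own statement) =====
-- stated objective: idiomatic
-- what changed: Replaces the index/mark loop with slicing by a single character-wise pass that accumulates the current operand in a buffer and flushes it at each symbol (and once at the end).
import Mathlib
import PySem

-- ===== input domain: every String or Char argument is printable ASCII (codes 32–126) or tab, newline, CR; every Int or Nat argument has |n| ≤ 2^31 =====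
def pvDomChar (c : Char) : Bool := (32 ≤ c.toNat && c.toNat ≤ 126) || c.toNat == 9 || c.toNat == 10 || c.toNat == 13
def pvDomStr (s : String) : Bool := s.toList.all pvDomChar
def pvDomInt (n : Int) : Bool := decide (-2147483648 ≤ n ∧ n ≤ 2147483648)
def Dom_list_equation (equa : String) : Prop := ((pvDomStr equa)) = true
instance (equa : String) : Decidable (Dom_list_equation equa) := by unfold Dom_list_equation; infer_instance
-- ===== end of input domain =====

-- B replaces A's index/mark loop with slicing by one character-wise pass that
-- accumulates the current operand in a buffer and flushes it at each symbol.

-- ===== PORT A =====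
-- loop body of A's 'for i in range(len(equa))' (state = (mark, result));
-- string indexing/slicing is done on the char list, exact for equa[i] / equa[mark:i]
def listEqA_step (cs : List Char) (s : Int × List String) (i : Int) : Int × List String :=
  let c := PySem.List.pyGetD cs i ' '
  if c ∈ PySem.Set.ofList "+&!()".toList then
    let r1 := if s.1 ≠ i then s.2 ++ [String.ofList (PySem.List.slice cs (some s.1) (some i))] else s.2
    let r2 := if c ≠ ' ' then r1 ++ [String.ofList [c]] else r1
    (i + 1, r2)
  else s

-- A's final 'if mark != len(equa): result.append(equa[mark:len(equa)])'
def listEqA_fin (cs : List Char) (s : Int × List String) : List String :=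
  if s.1 ≠ (cs.length : Int) then
    s.2 ++ [String.ofList (PySem.List.slice cs (some s.1) (some (cs.length : Int)))]
  else s.2

def list_equation (equa : String) : List String :=
  let cs := equa.toList
  listEqA_fin cs ((PySem.List.pyRange 0 (cs.length : Int) 1).foldl (listEqA_step cs) (0, []))

-- ===== PORT B =====
-- loop body of B's 'for ch in equa' (state = (result, buf))
def listEqB_step (s : List String × List Char) (ch : Char) : List String × List Char :=
  if ch ∈ "+&!()".toList then
    let r := if s.2 ≠ [] then s.1 ++ [String.ofList s.2] else s.1
    (r ++ [String.ofList [ch]], [])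
  else (s.1, s.2 ++ [ch])

-- B's final 'if buf: result.append(''.join(buf))'
def listEqB_fin (s : List String × List Char) : List String :=
  if s.2 ≠ [] then s.1 ++ [String.ofList s.2] else s.1

def list_equation_alt (equa : String) : List String :=
  listEqB_fin (equa.toList.foldl listEqB_step ([], []))

-- ===== PRECONDITION & SPEC =====
def Spec_list_equation (equa : String) (out : List String) : Prop := out = list_equation_alt equa
instance (equa : String) (out : List String) : Decidable (Spec_list_equation equa out) := by unfold Spec_list_equation; infer_instance

-- ===== CLAIM (what is proved, stated in full; the proofs are below) =====
def Claim_equal_list_equation : Prop := ∀ (equa : String), Dom_list_equation equa → Spec_list_equation equa (list_equation equa)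

-- ===== LEMMAS AND PROOFS =====

-- main loop invariant: after processing indices < k, A's pending segment
-- cs[mark:k] is exactly B's buffer, and the emitted results agree
lemma listEq_key (cs : List Char) :
    ∀ (rest : List Char) (k mark : Nat) (res : List String),
      cs.drop k = rest → mark ≤ k → k ≤ cs.length →
      listEqA_fin cs ((PySem.List.pyRange (k : Int) (cs.length : Int) 1).foldl (listEqA_step cs) ((mark : Int), res))
        = listEqB_fin (rest.foldl listEqB_step (res, (cs.drop mark).take (k - mark))) := by
  intro rest
  induction rest with
  | nil =>
    intro k mark res hdrop hmk hk
    have hk' : k = cs.length := by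
      have := List.length_drop (l := cs) (i := k) ▸ congrArg List.length hdrop
      simp at this; omega
    subst hk'
    have hrange : PySem.List.pyRange (cs.length : Int) (cs.length : Int) 1 = [] := by
      simp [PySem.List.pyRange]
    rw [hrange]
    simp only [List.foldl_nil, listEqA_fin, listEqB_fin]
    have hbuf : (cs.drop mark).take (cs.length - mark) = cs.drop mark := by
      apply List.take_of_length_le; simp
    rw [hbuf]
    have hslice : PySem.List.slice cs (some (mark : Int)) (some (cs.length : Int))
        = cs.drop mark := by
      rw [PySem.List.slice_natCast]; exact List.take_of_length_le (by simp)
    by_cases h : mark = cs.length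
    · subst h; simp
    · have hne : ((mark : Int)) ≠ (cs.length : Int) := by exact_mod_cast h
      have hbne : cs.drop mark ≠ [] := by
        intro hnil
        have := congrArg List.length hnil
        simp at this; omega
      simp [hne, hbne, hslice]
  | cons c rest ih =>
    intro k mark res hdrop hmk hk
    have hklt : k < cs.length := by
      by_contra h
      have h2 : cs.drop k = [] := List.drop_eq_nil_of_le (by omega)
      rw [h2] at hdrop; simp at hdrop
    have hget : cs[k] = c ∧ cs.drop (k + 1) = rest := by
      have := List.drop_eq_getElem_cons (l := cs) (h := hklt)
      rw [this] at hdrop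
      exact ⟨(List.cons.injEq _ _ _ _ ▸ hdrop).1, (List.cons.injEq _ _ _ _ ▸ hdrop).2⟩
    have hcons : PySem.List.pyRange (k : Int) (cs.length : Int) 1
        = (k : Int) :: PySem.List.pyRange ((k : Int) + 1) (cs.length : Int) 1 :=
      PySem.List.pyRange_one_cons (by exact_mod_cast hklt)
    rw [hcons, List.foldl_cons]
    have hc : PySem.List.pyGetD cs (k : Int) ' ' = c := by
      rw [PySem.List.pyGetD_natCast, List.getD_eq_getElem _ _ hklt, hget.1]
    have hsl : PySem.List.slice cs (some (mark : Int)) (some (k : Int))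
        = (cs.drop mark).take (k - mark) := PySem.List.slice_natCast cs mark k
    have hcast : ((k : Int) + 1) = (((k + 1 : Nat)) : Int) := by push_cast; ring
    have hbufne : ((cs.drop mark).take (k - mark) ≠ []) ↔ mark ≠ k := by
      constructor
      · intro h hmk'; subst hmk'; simp at h
      · intro h hnil
        have := congrArg List.length hnil
        simp at this; omega
    by_cases hmem : c ∈ PySem.Set.ofList "+&!()".toList
    · -- symbol character: both sides flush the buffer and emit the symbol
      have hcne : c ≠ ' ' := by
        intro h; subst h; revert hmem; decide
      have hmemB : c ∈ "+&!()".toList := by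
        simpa [PySem.Set.mem_ofList] using hmem
      by_cases hmk' : mark = k
      · subst hmk'
        have hstep : listEqA_step cs ((mark : Int), res) (mark : Int)
            = (((mark + 1 : Nat) : Int), res ++ [String.ofList [c]]) := by
          simp only [listEqA_step, hc, hsl]
          rw [if_pos hmem, if_pos hcne, if_neg (show ¬((mark : Int) ≠ (mark : Int)) by simp), hcast]
        rw [hstep, hcast, ih (mark + 1) (mark + 1) (res ++ [String.ofList [c]]) hget.2 (le_refl _) (by omega)]
        simp only [List.foldl_cons, listEqB_step]
        rw [if_pos hmemB]
        simp
      · have hne : ((mark : Int)) ≠ (k : Int) := by exact_mod_cast hmk'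
        have hstep : listEqA_step cs ((mark : Int), res) (k : Int)
            = (((k + 1 : Nat) : Int),
               (res ++ [String.ofList ((cs.drop mark).take (k - mark))]) ++ [String.ofList [c]]) := by
          simp only [listEqA_step, hc, hsl]
          rw [if_pos hmem, if_pos hcne, if_pos hne, hcast]
        rw [hstep, hcast, ih (k + 1) (k + 1) _ hget.2 (le_refl _) (by omega)]
        simp only [List.foldl_cons, listEqB_step]
        rw [if_pos hmemB]
        have : (cs.drop mark).take (k - mark) ≠ [] := hbufne.mpr hmk'
        simp [this]
    · -- ordinary character: A leaves (mark, res); B appends to the buffer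
      have hmemB : c ∉ "+&!()".toList := by
        simpa [PySem.Set.mem_ofList] using hmem
      have hstep : listEqA_step cs ((mark : Int), res) (k : Int) = ((mark : Int), res) := by
        simp only [listEqA_step, hc]
        rw [if_neg hmem]
      rw [hstep, hcast, ih (k + 1) mark res hget.2 (by omega) (by omega)]
      simp only [List.foldl_cons, listEqB_step]
      rw [if_neg hmemB]
      have hgq : (cs.drop mark)[k - mark]? = some c := by
        rw [List.getElem?_drop, show mark + (k - mark) = k by omega,
            List.getElem?_eq_getElem hklt, hget.1]
      have htake : (cs.drop mark).take (k + 1 - mark) = (cs.drop mark).take (k - mark) ++ [c] := by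
        rw [show k + 1 - mark = (k - mark) + 1 by omega, List.take_add_one, hgq]
        rfl
      rw [htake]

-- ===== VERDICT (by name: the statement is the Claim_ definition above) =====
theorem list_equation_spec : Claim_equal_list_equation := by
  intro equa _
  unfold Spec_list_equation list_equation list_equation_alt
  have h := listEq_key equa.toList equa.toList 0 0 [] (by simp) (le_refl _) (by simp)
  simpa using h
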